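-- pv_equiv track=rewrite | github.com/tracedowney/AuditOS--Desktop | app/engine/audit_certificates.py | parse_certutil_output
-- ===== SOURCE A (Python) =====
-- def parse_certutil_output(stdout: str):
--     certs = []
--     current = {}
--
--     for line in stdout.splitlines():
--         s = line.strip()
--         if s.startswith("===="):
--             if current:
--                 certs.append(current)
--                 current = {}
--             continue
--         if "Subject:" in s:
--             current["subject"] = s.split("Subject:", 1)[-1].strip()
--         elif "Issuer:" in s:
--             current["issuer"] = s.split("Issuer:", 1)[-1].strip()
--         elif "Serial Number:" in s:
--             current["serial_number"] = s.split("Serial Number:", 1)[-1].strip()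
--         elif "NotAfter:" in s:
--             current["not_after"] = s.split("NotAfter:", 1)[-1].strip()
--
--     if current:
--         certs.append(current)
--
--     return certs
-- ===== SOURCE B (Python) =====
-- def _parse_block(block):
--     cert = {}
--     for line in block:
--         s = line.strip()
--         if "Subject:" in s:
--             cert["subject"] = s.split("Subject:", 1)[-1].strip()
--         elif "Issuer:" in s:
--             cert["issuer"] = s.split("Issuer:", 1)[-1].strip()
--         elif "Serial Number:" in s:
--             cert["serial_number"] = s.split("Serial Number:", 1)[-1].strip()
--         elif "NotAfter:" in s:
--             cert["not_after"] = s.split("NotAfter:", 1)[-1].strip()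
--     return cert
--
--
-- def parse_certutil_output(stdout: str):
--     # Pass 1: segment the lines into blocks separated by '====' delimiter lines.
--     blocks = [[]]
--     for line in stdout.splitlines():
--         if line.strip().startswith("===="):
--             blocks.append([])
--         else:
--             blocks[-1].append(line)
--     # Pass 2: parse each block; keep only blocks that yielded any field.
--     certs = []
--     for block in blocks:
--         cert = _parse_block(block)
--         if cert:
--             certs.append(cert)
--     return certs
-- ===== Notes on version B (the rewrite author's own statement) =====
-- stated objective: alternative
-- what changed: Replaces the incremental state machine (one loop carrying a current-dict and flushing it at each delimiter line and at EOF) by two distinct passes: first segment the lines into blocks at delimiter lines, then parse each block independently and keep the non-empty results.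
import Mathlib
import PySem

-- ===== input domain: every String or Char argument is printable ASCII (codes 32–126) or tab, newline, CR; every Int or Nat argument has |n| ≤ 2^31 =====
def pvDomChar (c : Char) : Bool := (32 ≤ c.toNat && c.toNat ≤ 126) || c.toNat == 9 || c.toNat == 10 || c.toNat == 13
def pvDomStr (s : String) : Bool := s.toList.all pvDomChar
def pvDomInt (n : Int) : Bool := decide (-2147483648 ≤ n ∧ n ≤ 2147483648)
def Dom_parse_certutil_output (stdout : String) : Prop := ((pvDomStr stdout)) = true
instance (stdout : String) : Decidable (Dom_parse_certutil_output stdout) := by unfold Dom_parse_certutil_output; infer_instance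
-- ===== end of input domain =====

-- B replaces A's one-pass flush-at-delimiter state machine by two passes (segment into
-- blocks, then parse each block); alternative decomposition, same cost, return values equal.


-- ===== PORT A =====
-- s.split(key, 1)[-1].strip()  (split with a non-empty separator always returns a non-empty
-- list, so the .getD [] default is never used and [-1] never raises)
def pvTail (s key : String) : String :=
  PySem.Str.strip (PySem.List.pyGetD ((PySem.Str.splitMax? s key 1).getD []) (-1) "")

-- A's loop body: state = (certs so far, current dict)
def pvStepA (st : List (List (String × String)) × PySem.Dict String String) (line : String) :
    List (List (String × String)) × PySem.Dict String String :=
  let s := PySem.Str.strip line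
  if PySem.Str.startswith s "====" then
    if st.2.items ≠ [] then (st.1 ++ [st.2.items], PySem.Dict.empty) else st
  else if PySem.Str.isIn "Subject:" s then
    (st.1, st.2.insert "subject" (pvTail s "Subject:"))
  else if PySem.Str.isIn "Issuer:" s then
    (st.1, st.2.insert "issuer" (pvTail s "Issuer:"))
  else if PySem.Str.isIn "Serial Number:" s then
    (st.1, st.2.insert "serial_number" (pvTail s "Serial Number:"))
  else if PySem.Str.isIn "NotAfter:" s then
    (st.1, st.2.insert "not_after" (pvTail s "NotAfter:"))
  else st

def parse_certutil_output (stdout : String) : List (List (String × String)) :=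
  let fin := (PySem.Str.splitlines stdout).foldl pvStepA ([], PySem.Dict.empty)
  if fin.2.items ≠ [] then fin.1 ++ [fin.2.items] else fin.1

-- ===== PORT B =====
-- B's per-line parse of one block's line into the block's dict
def pvLineB (d : PySem.Dict String String) (line : String) : PySem.Dict String String :=
  let s := PySem.Str.strip line
  if PySem.Str.isIn "Subject:" s then d.insert "subject" (pvTail s "Subject:")
  else if PySem.Str.isIn "Issuer:" s then d.insert "issuer" (pvTail s "Issuer:")
  else if PySem.Str.isIn "Serial Number:" s then d.insert "serial_number" (pvTail s "Serial Number:")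
  else if PySem.Str.isIn "NotAfter:" s then d.insert "not_after" (pvTail s "NotAfter:")
  else d

def pvParseBlock (b : List String) : List (String × String) :=
  (b.foldl pvLineB PySem.Dict.empty).items

-- pass 1 loop body: state = (finished blocks, block being accumulated = blocks[-1])
def pvSegStep (st : List (List String) × List String) (line : String) :
    List (List String) × List String :=
  if PySem.Str.startswith (PySem.Str.strip line) "====" then (st.1 ++ [st.2], [])
  else (st.1, st.2 ++ [line])

-- pass 2 loop body
def pvCollect (certs : List (List (String × String))) (b : List String) :
    List (List (String × String)) :=
  let cert := pvParseBlock b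
  if cert ≠ [] then certs ++ [cert] else certs

def parse_certutil_output_alt (stdout : String) : List (List (String × String)) :=
  let seg := (PySem.Str.splitlines stdout).foldl pvSegStep ([], [])
  ((seg.1 ++ [seg.2]).foldl pvCollect [])

-- ===== PRECONDITION & SPEC =====
def Spec_parse_certutil_output (stdout : String) (out : List (List (String × String))) : Prop := out = parse_certutil_output_alt stdout
instance (stdout : String) (out : List (List (String × String))) : Decidable (Spec_parse_certutil_output stdout out) := by unfold Spec_parse_certutil_output; infer_instance

-- ===== CLAIM (what is proved, stated in full; the proofs are below) =====
def Claim_equal_parse_certutil_output : Prop := ∀ (stdout : String), Dom_parse_certutil_output stdout → Spec_parse_certutil_output stdout (parse_certutil_output stdout)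

-- ===== LEMMAS AND PROOFS =====

-- A's per-line update on a non-delimiter line is B's per-line parse
lemma pvStepA_not_delim (st : List (List (String × String)) × PySem.Dict String String)
    (line : String) (h : PySem.Str.startswith (PySem.Str.strip line) "====" = false) :
    pvStepA st line = (st.1, pvLineB st.2 line) := by
  have h' : PySem.Chars.startswith (PySem.Chars.strip line.toList) ['=', '=', '=', '='] = false := by
    simpa using h
  cases st with
  | mk C d =>
    simp [pvStepA, pvLineB, h']
    split_ifs <;> rfl

-- a dict whose items list is empty is the empty dict
lemma pvDict_items_nil {d : PySem.Dict String String} (h : d.items = []) :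
    d = PySem.Dict.empty := by
  apply PySem.Dict.ext
  simpa [PySem.Dict.empty] using h

-- main invariant: running A's loop from the state B would have reconstructed from
-- (finished blocks `fin`, current block `cur`) and then finalizing equals B's two passes
-- run on the segmentation state after the same lines.
lemma pvKey : ∀ (lines : List String) (fin : List (List String)) (cur : List String),
    (let st := lines.foldl pvStepA (fin.foldl pvCollect [], cur.foldl pvLineB PySem.Dict.empty)
     if st.2.items ≠ [] then st.1 ++ [st.2.items] else st.1)
    = (let seg := lines.foldl pvSegStep (fin, cur)
       (seg.1 ++ [seg.2]).foldl pvCollect []) := by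
  intro lines
  induction lines with
  | nil =>
    intro fin cur
    simp only [List.foldl_nil, List.foldl_append, List.foldl_cons]
    by_cases h : (cur.foldl pvLineB PySem.Dict.empty).items = []
    · simp [pvCollect, pvParseBlock, h]
    · simp [pvCollect, pvParseBlock, h]
  | cons l ls ih =>
    intro fin cur
    by_cases hd : PySem.Str.startswith (PySem.Str.strip l) "====" = true
    · have hdc : PySem.Chars.startswith (PySem.Chars.strip l.toList) ['=', '=', '=', '='] = true := by
        simpa using hd -- delimiter line: A flushes current (if non-empty), B closes the block
      have hstep : pvStepA (fin.foldl pvCollect [], cur.foldl pvLineB PySem.Dict.empty) l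
          = ((fin ++ [cur]).foldl pvCollect [], ([] : List String).foldl pvLineB PySem.Dict.empty) := by
        by_cases h : (cur.foldl pvLineB PySem.Dict.empty).items = []
        · have hde : cur.foldl pvLineB PySem.Dict.empty = PySem.Dict.empty :=
            pvDict_items_nil h
          have he : (PySem.Dict.empty : PySem.Dict String String).items = [] := rfl
          simp [pvStepA, hdc, List.foldl_append, pvCollect, pvParseBlock, hde, he]
        · simp [pvStepA, hdc, h, List.foldl_append, pvCollect, pvParseBlock]
      have hseg : pvSegStep (fin, cur) l = (fin ++ [cur], []) := by
        simp [pvSegStep, hdc]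
      simp only [List.foldl_cons, hstep, hseg]
      exact ih (fin ++ [cur]) []
    · -- ordinary line: both sides extend the current block/dict with the line
      have hd' : PySem.Chars.startswith (PySem.Chars.strip l.toList) ['=', '=', '=', '='] = false := by
        simpa using hd
      have hstep : pvStepA (fin.foldl pvCollect [], cur.foldl pvLineB PySem.Dict.empty) l
          = (fin.foldl pvCollect [], (cur ++ [l]).foldl pvLineB PySem.Dict.empty) := by
        rw [pvStepA_not_delim _ _ (by simpa using hd')]
        simp [List.foldl_append]
      have hseg : pvSegStep (fin, cur) l = (fin, cur ++ [l]) := by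
        simp [pvSegStep, hd']
      simp only [List.foldl_cons, hstep, hseg]
      exact ih fin (cur ++ [l])

-- ===== VERDICT (by name: the statement is the Claim_ definition above) =====
theorem parse_certutil_output_spec : Claim_equal_parse_certutil_output := by
  intro stdout _
  unfold Spec_parse_certutil_output parse_certutil_output parse_certutil_output_alt
  simpa using pvKey (PySem.Str.splitlines stdout) [] []
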